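-- pv_equiv track=rewrite | github.com/AishwaryaRK/Code | TopCoderPractice/GraphTheory/TheAirTripDivTwo.py | find
-- ===== SOURCE A (Python) =====
-- def find(flights, fuel):
--     cnt = 0
--     for flight_fuel in flights:
--         if fuel >= flight_fuel:
--             cnt += 1
--             fuel -= flight_fuel
--         else:
--             break
--
--     return cnt
-- ===== SOURCE B (Python) =====
-- def find(flights, fuel):
--     # Counting formulation without break: position i is reachable iff the
--     # maximum prefix-sum up to i stays within fuel; since that running maximum
--     # is nondecreasing, counting reachable positions over the WHOLE list equals
--     # the length of the prefix flown before fuel runs out.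
--     cnt = 0
--     running = 0
--     peak = None
--     for f in flights:
--         running += f
--         peak = running if peak is None else max(peak, running)
--         if peak <= fuel:
--             cnt += 1
--     return cnt
-- ===== Notes on version B (the rewrite author's own statement) =====
-- stated objective: alternative
-- what changed: Replaces the subtract-fuel-and-break loop by a full-pass counting formulation: maintain the running maximum of prefix sums and count every position whose running maximum stays within the original fuel (no mutation of fuel, no early exit); correct because that running maximum is nondecreasing.
import Mathlib
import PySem

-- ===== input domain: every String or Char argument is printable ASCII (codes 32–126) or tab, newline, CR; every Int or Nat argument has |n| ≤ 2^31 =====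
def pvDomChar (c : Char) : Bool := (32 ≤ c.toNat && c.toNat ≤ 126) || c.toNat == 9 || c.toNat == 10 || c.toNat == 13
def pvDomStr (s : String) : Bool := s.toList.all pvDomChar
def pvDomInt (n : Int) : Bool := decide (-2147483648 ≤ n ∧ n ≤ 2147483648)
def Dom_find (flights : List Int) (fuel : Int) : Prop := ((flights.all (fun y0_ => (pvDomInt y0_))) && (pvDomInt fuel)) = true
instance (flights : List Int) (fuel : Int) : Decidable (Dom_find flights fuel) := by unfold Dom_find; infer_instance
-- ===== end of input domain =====

-- B replaces the subtract-and-break loop by a full pass counting positions whose running maximum of prefix sums stays within fuel; same cost, different algorithmic formulation.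

-- ===== PORT A =====
-- the for/break loop mutating cnt and fuel
def findGo : List Int → Int → Int → Int
  | [], _, cnt => cnt
  | f :: rest, fuel, cnt =>
      if fuel ≥ f then findGo rest (fuel - f) (cnt + 1) else cnt

def find (flights : List Int) (fuel : Int) : Int := findGo flights fuel 0

-- ===== PORT B =====
-- full pass: running prefix sum, its running maximum (None before the first element), count of in-budget peaks
def findAltGo : List Int → Int → Option Int → Int → Int → Int
  | [], _, _, _, cnt => cnt
  | f :: rest, fuel, peak, running, cnt =>
      let running' := running + f
      let peak' := match peak with
        | none => running'
        | some p => max p running'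
      findAltGo rest fuel (some peak') running' (if peak' ≤ fuel then cnt + 1 else cnt)

def find_alt (flights : List Int) (fuel : Int) : Int := findAltGo flights fuel none 0 0

-- ===== PRECONDITION & SPEC =====
def Spec_find (flights : List Int) (fuel : Int) (out : Int) : Prop := out = find_alt flights fuel
instance (flights : List Int) (fuel : Int) (out : Int) : Decidable (Spec_find flights fuel out) := by unfold Spec_find; infer_instance

-- ===== CLAIM (what is proved, stated in full; the proofs are below) =====
def Claim_equal_find : Prop := ∀ (flights : List Int) (fuel : Int), Dom_find flights fuel → Spec_find flights fuel (find flights fuel)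

-- ===== LEMMAS AND PROOFS =====
-- once the peak exceeds fuel it stays above fuel, so cnt never increments again
theorem findAltGo_stuck (fl : List Int) :
    ∀ (fuel p running cnt : Int), fuel < p →
      findAltGo fl fuel (some p) running cnt = cnt := by
  induction fl with
  | nil => intro fuel p running cnt _; rfl
  | cons f rest ih =>
      intro fuel p running cnt h
      simp only [findAltGo]
      have h1 : ¬ (max p (running + f) ≤ fuel) := by
        have := le_max_left p (running + f); omega
      rw [if_neg h1]
      exact ih fuel (max p (running + f)) (running + f) cnt
        (by have := le_max_left p (running + f); omega)

-- invariant: A's remaining fuel is fuel - running, and B's peak so far is within fuel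
theorem findGo_eq_findAltGo (fl : List Int) :
    ∀ (fuel running cnt : Int) (peak : Option Int),
      (peak = none ∨ ∃ p, peak = some p ∧ p ≤ fuel) →
      findGo fl (fuel - running) cnt = findAltGo fl fuel peak running cnt := by
  induction fl with
  | nil => intro fuel running cnt peak _; rfl
  | cons f rest ih =>
      intro fuel running cnt peak hpeak
      simp only [findGo, findAltGo]
      set pk := (match peak with
        | none => running + f
        | some p => max p (running + f)) with hpkdef
      by_cases h : fuel - running ≥ f
      · rw [if_pos h]
        have hr : running + f ≤ fuel := by omega
        have hpk : pk ≤ fuel := by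
          rw [hpkdef]
          rcases hpeak with h0 | ⟨p, hp, hple⟩
          · subst h0; exact hr
          · subst hp
            show max p (running + f) ≤ fuel
            simp only [max_le_iff]; omega
        rw [if_pos hpk]
        have := ih fuel (running + f) (cnt + 1) (some pk) (Or.inr ⟨pk, rfl, hpk⟩)
        have heq : fuel - running - f = fuel - (running + f) := by ring
        rw [heq]
        exact this
      · rw [if_neg h]
        have hr : fuel < running + f := by omega
        have hpk : fuel < pk := by
          rw [hpkdef]
          rcases hpeak with h0 | ⟨p, hp, _⟩
          · subst h0; exact hr
          · subst hp
            show fuel < max p (running + f)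
            have := le_max_right p (running + f); omega
        rw [if_neg (not_le.mpr hpk)]
        exact (findAltGo_stuck rest fuel pk (running + f) cnt hpk).symm

-- ===== VERDICT (by name: the statement is the Claim_ definition above) =====
theorem find_spec : Claim_equal_find := by
  intro flights fuel _
  unfold Spec_find find find_alt
  have := findGo_eq_findAltGo flights fuel 0 0 none (Or.inl rfl)
  simpa using this
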